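-- pv_equiv track=rewrite | github.com/superbunny38/2022-3CodingTestPrepTeam | Week6/누울 자리를 찾아라/류채은.py | check
-- ===== SOURCE A (Python) =====
-- def check(graph,N):
--     visited_garo = [[0]*N for _ in range(N)]
--     visited_sero = [[0]*N for _ in range(N)]
--     n_garo,n_sero = 0,0
--
--     for i in range(N):
--         for j in range(N):
--             if graph[i][j] == 'X':
--                 continue
--
--             if j+1<N and visited_garo[i][j] == 0 and visited_garo[i][j+1] == 0 and graph[i][j+1] == '.':
--                 visited_garo[i][j] = 1
--                 visited_garo[i][j+1] = 1
--                 n_garo += 1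
--                 move_x = 2
--                 while move_x+j<N:
--                     if graph[i][j+move_x] == '.' and visited_garo[i][j+move_x] == 0:
--                         visited_garo[i][j+move_x] = 1
--                         move_x+=1
--                     else:
--                         break
--
--             if i+1<N and visited_sero[i][j] == 0 and visited_sero[i+1][j] == 0 and graph[i+1][j] == '.':
--                 visited_sero[i][j]=1
--                 visited_sero[i+1][j]=1
--                 n_sero += 1
--                 move_y = 2
--                 while move_y+i<N:
--                     if graph[move_y+i][j] == '.' and visited_sero[move_y+i][j] == 0:
--                         visited_sero[move_y+i][j] =1
--                         move_y+=1
--                     else: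
--                         break
--
--     return n_garo,n_sero
-- ===== SOURCE B (Python) =====
-- def check(graph, N):
--     # Count "run starts" with a stateless 3-cell window instead of visited matrices:
--     # position j starts a run iff cell j is not 'X', cell j+1 is '.', and j is not
--     # already covered by a run coming from the left (cell j == '.' and cell j-1 != 'X').
--     def runs(line):
--         total = 0
--         for j in range(N - 1):
--             if line[j] != 'X' and line[j + 1] == '.' and (j == 0 or line[j] != '.' or line[j - 1] == 'X'):
--                 total += 1
--         return total
--     n_garo = sum(runs(graph[i]) for i in range(N))
--     n_sero = sum(runs([graph[i][j] for i in range(N)]) for j in range(N))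
--     return n_garo, n_sero
-- ===== Notes on version B (the rewrite author's own statement) =====
-- stated objective: simpler
-- what changed: Replaced the two N×N visited matrices and the nested while-loop run extensions by a stateless three-cell window test that counts a run start at j iff cell j is not 'X', cell j+1 is '.', and j is not already covered from the left, summed per row and per column.
import Mathlib
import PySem

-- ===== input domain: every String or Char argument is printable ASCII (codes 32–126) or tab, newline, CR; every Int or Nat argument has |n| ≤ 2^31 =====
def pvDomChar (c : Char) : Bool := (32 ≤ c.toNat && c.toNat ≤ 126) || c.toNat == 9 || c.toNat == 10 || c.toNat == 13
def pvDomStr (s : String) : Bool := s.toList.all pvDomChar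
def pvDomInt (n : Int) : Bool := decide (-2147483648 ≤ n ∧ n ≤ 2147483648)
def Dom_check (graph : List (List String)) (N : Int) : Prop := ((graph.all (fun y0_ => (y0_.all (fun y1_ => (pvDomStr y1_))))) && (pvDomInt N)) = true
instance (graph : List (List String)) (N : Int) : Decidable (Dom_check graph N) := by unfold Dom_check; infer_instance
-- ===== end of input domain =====

-- B replaces A's two N×N visited matrices and nested while-extensions by a stateless
-- three-cell window test counting run starts per row/column (objective: simpler).
-- Neither program mutates its arguments; the equivalence is about the return value.

-- ===== PORT A =====
-- graph[i][j] read; inside Pre_check every read A performs is in range, so the default "" is never hit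
def gcell (g : List (List String)) (i j : Nat) : String := (g.getD i []).getD j ""
-- visited[i][j] read / write of 1; A's indices into the N×N visited matrices are always in range
def vget (m : List (List Int)) (i j : Nat) : Int := (m.getD i []).getD j 0
def vset (m : List (List Int)) (i j : Nat) : List (List Int) := m.set i ((m.getD i []).set j 1)

-- A's inner 'while move_x+j<N' loop; fuel = (N-j-move_x).toNat counts the iterations still
-- allowed by the loop condition, so 'fuel = 0' is exactly 'move_x+j<N' failing
def whileGaro (g : List (List String)) (i j : Nat) : Nat → Nat → List (List Int) → List (List Int)
  | _, 0, vg => vg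
  | moveX, fuel+1, vg =>
      if gcell g i (j+moveX) = "." ∧ vget vg i (j+moveX) = 0 then
        whileGaro g i j (moveX+1) fuel (vset vg i (j+moveX))
      else vg

-- A's inner 'while move_y+i<N' loop, same scheme
def whileSero (g : List (List String)) (i j : Nat) : Nat → Nat → List (List Int) → List (List Int)
  | _, 0, vs => vs
  | moveY, fuel+1, vs =>
      if gcell g (i+moveY) j = "." ∧ vget vs (i+moveY) j = 0 then
        whileSero g i j (moveY+1) fuel (vset vs (i+moveY) j)
      else vs

-- one iteration of A's nested for-loops; state = (visited_garo, visited_sero, n_garo, n_sero)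
def bodyA (g : List (List String)) (N : Int) (i j : Nat)
    (st : List (List Int) × List (List Int) × Int × Int) :
    List (List Int) × List (List Int) × Int × Int :=
  if gcell g i j = "X" then st
  else
    let p1 : List (List Int) × Int :=
      if ((j:Int)+1 < N ∧ vget st.1 i j = 0 ∧ vget st.1 i (j+1) = 0 ∧ gcell g i (j+1) = ".") then
        (whileGaro g i j 2 (N - (j:Int) - 2).toNat (vset (vset st.1 i j) i (j+1)), st.2.2.1 + 1)
      else (st.1, st.2.2.1)
    let p2 : List (List Int) × Int :=
      if ((i:Int)+1 < N ∧ vget st.2.1 i j = 0 ∧ vget st.2.1 (i+1) j = 0 ∧ gcell g (i+1) j = ".") then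
        (whileSero g i j 2 (N - (i:Int) - 2).toNat (vset (vset st.2.1 i j) (i+1) j), st.2.2.2 + 1)
      else (st.2.1, st.2.2.2)
    (p1.1, p2.1, p1.2, p2.2)

def check (graph : List (List String)) (N : Int) : Int × Int :=
  let n := N.toNat
  let init : List (List Int) × List (List Int) × Int × Int :=
    (List.replicate n (List.replicate n (0:Int)), List.replicate n (List.replicate n (0:Int)), 0, 0)
  let fin := (List.range n).foldl
    (fun st i => (List.range n).foldl (fun st' j => bodyA graph N i j st') st) init
  (fin.2.2.1, fin.2.2.2)

-- ===== PORT B =====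
-- Source B's runs(line): count j in range(N-1) whose three-cell window starts a run
def runsB (line : List String) (N : Int) : Int :=
  (List.range (N-1).toNat).foldl
    (fun total j =>
      if line.getD j "" ≠ "X" ∧ line.getD (j+1) "" = "." ∧
         (j = 0 ∨ line.getD j "" ≠ "." ∨ line.getD (j-1) "" = "X")
      then total + 1 else total) 0

def check_alt (graph : List (List String)) (N : Int) : Int × Int :=
  let n := N.toNat
  let ng := ((List.range n).map (fun i => runsB (graph.getD i []) N)).sum
  let ns := ((List.range n).map
      (fun j => runsB ((List.range n).map (fun i => (graph.getD i []).getD j "")) N)).sum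
  (ng, ns)

-- ===== PRECONDITION & SPEC =====
-- Pre_check excludes exactly the inputs on which the Python A raises IndexError:
-- fewer than N rows, or one of the first N rows shorter than N.
def Pre_check (graph : List (List String)) (N : Int) : Prop :=
  N ≤ (graph.length : Int) ∧ ∀ r ∈ graph.take N.toNat, N ≤ (r.length : Int)
instance (graph : List (List String)) (N : Int) : Decidable (Pre_check graph N) := by
  unfold Pre_check; infer_instance

def pvWitness_check : List (List String) × Int := ([[".", "."], [".", "X"]], 2)

def Spec_check (graph : List (List String)) (N : Int) (out : Int × Int) : Prop := out = check_alt graph N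
instance (graph : List (List String)) (N : Int) (out : Int × Int) : Decidable (Spec_check graph N out) := by unfold Spec_check; infer_instance

-- ===== CLAIM (what is proved, stated in full; the proofs are below) =====
def Claim_equal_check : Prop := ∀ (graph : List (List String)) (N : Int), Dom_check graph N → Pre_check graph N → Spec_check graph N (check graph N)

-- ===== LEMMAS AND PROOFS =====

def covB (c : Nat → String) (j0 k : Nat) : Bool :=
  k == j0 || (decide (j0 < k) && (List.range (k - j0)).all (fun t => c (j0+1+t) == "."))

lemma covB_iff (c : Nat → String) (j0 k : Nat) :
    covB c j0 k = true ↔ (k = j0 ∨ (j0 < k ∧ ∀ t, j0 < t → t ≤ k → c t = ".")) := by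
  simp only [covB, Bool.or_eq_true, beq_iff_eq, Bool.and_eq_true, decide_eq_true_eq,
    List.all_eq_true, List.mem_range]
  constructor
  · rintro (h | ⟨h1, h2⟩)
    · exact Or.inl h
    · refine Or.inr ⟨h1, fun t ht1 ht2 => ?_⟩
      have := h2 (t - j0 - 1) (by omega)
      simpa [show j0 + 1 + (t - j0 - 1) = t by omega] using this
  · rintro (h | ⟨h1, h2⟩)
    · exact Or.inl h
    · refine Or.inr ⟨h1, fun t ht => ?_⟩
      simpa using h2 (j0+1+t) (by omega) (by omega)

lemma covB_restrict (c : Nat → String) {j0 m k : Nat}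
    (h : covB c j0 k = true) (h1 : j0 ≤ m) (h2 : m ≤ k) : covB c j0 m = true := by
  rw [covB_iff] at h ⊢
  rcases h with h | ⟨hk, hall⟩
  · left; omega
  · rcases Nat.eq_or_lt_of_le h1 with rfl | hm
    · left; rfl
    · exact Or.inr ⟨hm, fun t ht1 ht2 => hall t ht1 (by omega)⟩

lemma covB_extend (c : Nat → String) {j0 m : Nat}
    (h : covB c j0 m = true) (hm : j0 ≤ m) (hc : c (m+1) = ".") : covB c j0 (m+1) = true := by
  rw [covB_iff] at h ⊢
  refine Or.inr ⟨by omega, fun t ht1 ht2 => ?_⟩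
  rcases Nat.eq_or_lt_of_le ht2 with rfl | ht
  · exact hc
  · rcases h with rfl | ⟨_, hall⟩
    · omega
    · exact hall t ht1 (by omega)

def startB (c : Nat → String) (n j : Nat) : Bool :=
  c j != "X" && decide (j+1 < n) && c (j+1) == "." &&
  (j == 0 || c j != "." || c (j-1) == "X")

def markB (c : Nat → String) (n s k : Nat) : Bool :=
  (List.range s).any (fun j0 => startB c n j0 && covB c j0 k)

lemma markB_iff (c : Nat → String) (n s k : Nat) :
    markB c n s k = true ↔ ∃ j0, j0 < s ∧ startB c n j0 = true ∧ covB c j0 k = true := by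
  simp [markB, List.mem_range]

lemma startB_iff (c : Nat → String) (n j : Nat) :
    startB c n j = true ↔
      c j ≠ "X" ∧ j+1 < n ∧ c (j+1) = "." ∧ (j = 0 ∨ c j ≠ "." ∨ c (j-1) = "X") := by
  simp [startB]; tauto

lemma markB_self_iff (c : Nat → String) {n j : Nat} (hj : j < n) :
    markB c n j j = true ↔ (0 < j ∧ c j = "." ∧ c (j-1) ≠ "X") := by
  induction j using Nat.strong_induction_on with
  | _ j ih =>
    constructor
    · rw [markB_iff]
      rintro ⟨j0, hlt, hs, hcov⟩
      rw [covB_iff] at hcov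
      rcases hcov with rfl | ⟨hj0, hall⟩
      · omega
      rw [startB_iff] at hs
      refine ⟨by omega, hall j hj0 le_rfl, ?_⟩
      rcases Nat.eq_or_lt_of_le (Nat.succ_le_of_lt hj0) with h | h
      · rw [show j - 1 = j0 from by omega]; exact hs.1
      · have hd := hall (j-1) (by omega) (by omega)
        rw [hd]; decide
    · rintro ⟨hj0, hcj, hcx⟩
      set j' := j - 1 with hj'
      have hjj : j = j' + 1 := by omega
      by_cases h4 : j' = 0 ∨ c j' ≠ "." ∨ c (j'-1) = "X"
      · rw [markB_iff]
        refine ⟨j', by omega, ?_, ?_⟩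
        · rw [startB_iff]
          refine ⟨hcx, by omega, ?_, h4⟩
          rw [show j' + 1 = j from hjj.symm]; exact hcj
        · rw [covB_iff]
          exact Or.inr ⟨by omega, fun t ht1 ht2 => by
            have : t = j := by omega
            rw [this]; exact hcj⟩
      · rw [not_or, not_or] at h4
        obtain ⟨h1, h2', h3⟩ := h4
        have h2 : c j' = "." := not_not.mp h2'
        have hj'n : j' < n := by omega
        have := (ih j' (by omega) hj'n).mpr ⟨Nat.pos_of_ne_zero h1, h2, h3⟩
        rw [markB_iff] at this ⊢
        obtain ⟨j0, hlt, hs, hcov⟩ := this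
        refine ⟨j0, by omega, hs, ?_⟩
        have : covB c j0 (j' + 1) = true := by
          apply covB_extend c hcov (by
            rw [covB_iff] at hcov
            rcases hcov with rfl | ⟨h, _⟩ <;> omega)
          rw [← hjj]; exact hcj
        rwa [← hjj] at this

lemma markB_of_ge (c : Nat → String) {n j t : Nat}
    (hs : startB c n j = true) (ht : j ≤ t) (htn : t < n) : markB c n j t = false := by
  by_contra h
  have h' : markB c n j t = true := by
    cases hmt : markB c n j t
    · exact absurd hmt h
    · rfl
  rw [markB_iff] at h'
  obtain ⟨j0, hlt, hs0, hcov⟩ := h'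
  have hcovj : covB c j0 j = true := covB_restrict c hcov (by omega) ht
  have hmj : markB c n j j = true := by
    rw [markB_iff]; exact ⟨j0, hlt, hs0, hcovj⟩
  have hn : j < n := by omega
  rw [markB_self_iff c hn] at hmj
  rw [startB_iff] at hs
  obtain ⟨_, _, _, h4⟩ := hs
  rcases h4 with h | h | h
  · omega
  · exact h hmj.2.1
  · exact hmj.2.2 h

def shapeM (m : List (List Int)) (n : Nat) : Prop :=
  m.length = n ∧ ∀ k, k < n → (m.getD k []).length = n

lemma getD_set_list {α : Type} (m : List α) (a : Nat) (r : α) (k : Nat) (d : α) :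
    (m.set a r).getD k d = if k = a ∧ a < m.length then r else m.getD k d := by
  by_cases h1 : k = a
  · subst h1
    by_cases h2 : k < m.length
    · simp [List.getD_eq_getElem?_getD, List.getElem?_set, h2]
    · rw [if_neg (by omega)]
      simp [List.getD_eq_getElem?_getD, List.getElem?_set, h2]
  · rw [if_neg (by tauto)]
    simp only [List.getD_eq_getElem?_getD, List.getElem?_set]
    rw [if_neg (fun h => h1 h.symm)]

lemma getD_replicate_if {α : Type} (n : Nat) (a : α) (k : Nat) (d : α) :
    (List.replicate n a).getD k d = if k < n then a else d := by
  rw [List.getD_eq_getElem?_getD, List.getElem?_replicate]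
  split <;> simp

lemma shapeM_vset {m : List (List Int)} {n a b : Nat}
    (h : shapeM m n) : shapeM (vset m a b) n := by
  obtain ⟨hl, hr⟩ := h
  refine ⟨by simp [vset, hl], fun k hk => ?_⟩
  rw [vset, getD_set_list]
  split
  · rename_i hcond
    have hlen := hr a (by omega)
    simpa using hlen
  · exact hr k hk

lemma vget_vset {m : List (List Int)} {n : Nat} (h : shapeM m n)
    {a b : Nat} (ha : a < n) (hb : b < n) (x y : Nat) :
    vget (vset m a b) x y = if x = a ∧ y = b then 1 else vget m x y := by
  obtain ⟨hl, hr⟩ := h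
  rw [vget, vset, getD_set_list]
  by_cases hxa : x = a
  · rw [if_pos ⟨hxa, by omega⟩, getD_set_list]
    by_cases hyb : y = b
    · rw [if_pos ⟨hyb, by rw [hr a ha]; omega⟩, if_pos ⟨hxa, hyb⟩]
    · rw [if_neg (by tauto), if_neg (by tauto)]
      rw [vget, hxa]
  · rw [if_neg (by tauto), if_neg (by tauto)]
    rfl

lemma shapeM_replicate (n : Nat) :
    shapeM (List.replicate n (List.replicate n (0:Int))) n := by
  refine ⟨by simp, fun k hk => ?_⟩
  rw [getD_replicate_if, if_pos hk]
  simp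

lemma vget_replicate (n x y : Nat) :
    vget (List.replicate n (List.replicate n (0:Int))) x y = 0 := by
  rw [vget, getD_replicate_if]
  split
  · rw [getD_replicate_if]; split <;> rfl
  · rfl

def rowc (g : List (List String)) (i : Nat) : Nat → String := fun k => gcell g i k

def colc (g : List (List String)) (c : Nat) : Nat → String := fun r => gcell g r c

lemma markB_succ (c : Nat → String) (n s k : Nat) :
    markB c n (s+1) k = (markB c n s k || (startB c n s && covB c s k)) := by
  simp [markB, List.range_succ]

lemma whileGaro_spec (g : List (List String)) (n i j : Nat) (hi : i < n)
    (hst : startB (rowc g i) n j = true) :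
    ∀ fuel moveX vg, 2 ≤ moveX → fuel = n - (j + moveX) →
    shapeM vg n →
    covB (rowc g i) j (j + moveX - 1) = true →
    (∀ k, k < n → vget vg i k =
        if (markB (rowc g i) n j k || (decide (j ≤ k) && decide (k < j + moveX))) then 1 else 0) →
    shapeM (whileGaro g i j moveX fuel vg) n ∧
    (∀ x y, x ≠ i → vget (whileGaro g i j moveX fuel vg) x y = vget vg x y) ∧
    (∀ k, k < n → vget (whileGaro g i j moveX fuel vg) i k =
        if markB (rowc g i) n (j+1) k then 1 else 0) := by
  intro fuel
  induction fuel with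
  | zero =>
    intro moveX vg hmx hfuel hshape hcov hwin
    refine ⟨hshape, fun _ _ _ => rfl, fun k hk => ?_⟩
    rw [show whileGaro g i j moveX 0 vg = vg from rfl, hwin k hk]
    congr 1
    rw [markB_succ, hst, Bool.true_and]
    congr 1
    by_cases hjk : j ≤ k
    · have h1 : covB (rowc g i) j k = true :=
        covB_restrict _ hcov hjk (by omega)
      simp [h1, hjk]
      omega
    · have h1 : covB (rowc g i) j k = false := by
        cases h : covB (rowc g i) j k
        · rfl
        · rw [covB_iff] at h
          rcases h with rfl | ⟨h, _⟩ <;> omega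
      simp [h1, hjk]
  | succ fuel ih =>
    intro moveX vg hmx hfuel hshape hcov hwin
    have hjm : j + moveX < n := by omega
    have hv0 : vget vg i (j + moveX) = 0 := by
      rw [hwin _ hjm, markB_of_ge _ hst (by omega) hjm]
      simp
    by_cases hdot : gcell g i (j+moveX) = "."
    · rw [show whileGaro g i j moveX (fuel+1) vg =
          whileGaro g i j (moveX+1) fuel (vset vg i (j+moveX)) from by
        rw [whileGaro]; rw [if_pos ⟨hdot, hv0⟩]]
      have hres := ih (moveX+1) (vset vg i (j+moveX)) (by omega) (by omega)
        (shapeM_vset hshape)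
        (by
          have : covB (rowc g i) j (j + moveX - 1 + 1) = true :=
            covB_extend _ hcov (by omega)
              (by rw [show j + moveX - 1 + 1 = j + moveX from by omega]; exact hdot)
          rwa [show j + moveX - 1 + 1 = j + (moveX+1) - 1 from by omega] at this)
        (by
          intro k hk
          rw [vget_vset hshape hi hjm]
          by_cases hkm : k = j + moveX
          · have hb : (markB (rowc g i) n j k ||
                (decide (j ≤ k) && decide (k < j + (moveX+1)))) = true := by
              subst hkm
              have h1 : j ≤ j + moveX := by omega
              have h2 : j + moveX < j + (moveX+1) := by omega
              simp [h1, h2]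
            rw [if_pos ⟨rfl, hkm⟩, hb]
            simp
          · rw [if_neg (by tauto), hwin k hk]
            have hwb : (decide (j ≤ k) && decide (k < j + moveX))
                = (decide (j ≤ k) && decide (k < j + (moveX+1))) := by
              by_cases hle : j ≤ k <;> by_cases hlt : k < j + moveX
              · have : k < j + (moveX+1) := by omega
                simp [hle, hlt, this]
              · have : ¬ k < j + (moveX+1) := by omega
                simp [hle, hlt, this]
              · simp [hle]
              · simp [hle]
            rw [hwb])
      refine ⟨hres.1, fun x y hx => ?_, hres.2.2⟩
      rw [hres.2.1 x y hx, vget_vset hshape hi hjm, if_neg (by tauto)]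
    · rw [show whileGaro g i j moveX (fuel+1) vg = vg from by
        rw [whileGaro]; rw [if_neg (by tauto)]]
      refine ⟨hshape, fun _ _ _ => rfl, fun k hk => ?_⟩
      rw [hwin k hk]
      congr 1
      rw [markB_succ, hst, Bool.true_and]
      congr 1
      by_cases hjk : j ≤ k
      · by_cases hkm : k < j + moveX
        · have h1 : covB (rowc g i) j k = true :=
            covB_restrict _ hcov hjk (by omega)
          simp [h1, hjk, hkm]
        · have h1 : covB (rowc g i) j k = false := by
            cases h : covB (rowc g i) j k
            · rfl
            · exfalso
              rw [covB_iff] at h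
              rcases h with rfl | ⟨h, hall⟩
              · omega
              · exact hdot (hall (j+moveX) (by omega) (by omega))
          simp [h1, hjk, hkm]
      · have h1 : covB (rowc g i) j k = false := by
          cases h : covB (rowc g i) j k
          · rfl
          · rw [covB_iff] at h
            rcases h with rfl | ⟨h, _⟩ <;> omega
        simp [h1, hjk]

lemma whileSero_spec (g : List (List String)) (n i j : Nat) (hj : j < n)
    (hst : startB (colc g j) n i = true) :
    ∀ fuel moveY vs, 2 ≤ moveY → fuel = n - (i + moveY) →
    shapeM vs n →
    covB (colc g j) i (i + moveY - 1) = true →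
    (∀ r, r < n → vget vs r j =
        if (markB (colc g j) n i r || (decide (i ≤ r) && decide (r < i + moveY))) then 1 else 0) →
    shapeM (whileSero g i j moveY fuel vs) n ∧
    (∀ x y, y ≠ j → vget (whileSero g i j moveY fuel vs) x y = vget vs x y) ∧
    (∀ r, r < n → vget (whileSero g i j moveY fuel vs) r j =
        if markB (colc g j) n (i+1) r then 1 else 0) := by
  intro fuel
  induction fuel with
  | zero =>
    intro moveY vs hmy hfuel hshape hcov hwin
    refine ⟨hshape, fun _ _ _ => rfl, fun r hr => ?_⟩
    rw [show whileSero g i j moveY 0 vs = vs from rfl, hwin r hr]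
    congr 1
    rw [markB_succ, hst, Bool.true_and]
    congr 1
    by_cases hir : i ≤ r
    · have h1 : covB (colc g j) i r = true :=
        covB_restrict _ hcov hir (by omega)
      simp [h1, hir]
      omega
    · have h1 : covB (colc g j) i r = false := by
        cases h : covB (colc g j) i r
        · rfl
        · rw [covB_iff] at h
          rcases h with rfl | ⟨h, _⟩ <;> omega
      simp [h1, hir]
  | succ fuel ih =>
    intro moveY vs hmy hfuel hshape hcov hwin
    have him : i + moveY < n := by omega
    have hv0 : vget vs (i + moveY) j = 0 := by
      rw [hwin _ him, markB_of_ge _ hst (by omega) him]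
      simp
    by_cases hdot : gcell g (i+moveY) j = "."
    · rw [show whileSero g i j moveY (fuel+1) vs =
          whileSero g i j (moveY+1) fuel (vset vs (i+moveY) j) from by
        rw [whileSero]; rw [if_pos ⟨hdot, hv0⟩]]
      have hres := ih (moveY+1) (vset vs (i+moveY) j) (by omega) (by omega)
        (shapeM_vset hshape)
        (by
          have : covB (colc g j) i (i + moveY - 1 + 1) = true :=
            covB_extend _ hcov (by omega)
              (by rw [show i + moveY - 1 + 1 = i + moveY from by omega]; exact hdot)
          rwa [show i + moveY - 1 + 1 = i + (moveY+1) - 1 from by omega] at this)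
        (by
          intro r hr
          rw [vget_vset hshape him hj]
          by_cases hrm : r = i + moveY
          · have hb : (markB (colc g j) n i r ||
                (decide (i ≤ r) && decide (r < i + (moveY+1)))) = true := by
              subst hrm
              have h1 : i ≤ i + moveY := by omega
              have h2 : i + moveY < i + (moveY+1) := by omega
              simp [h1, h2]
            rw [if_pos ⟨hrm, rfl⟩, hb]
            simp
          · rw [if_neg (by tauto), hwin r hr]
            have hwb : (decide (i ≤ r) && decide (r < i + moveY))
                = (decide (i ≤ r) && decide (r < i + (moveY+1))) := by
              by_cases hle : i ≤ r <;> by_cases hlt : r < i + moveY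
              · have : r < i + (moveY+1) := by omega
                simp [hle, hlt, this]
              · have : ¬ r < i + (moveY+1) := by omega
                simp [hle, hlt, this]
              · simp [hle]
              · simp [hle]
            rw [hwb])
      refine ⟨hres.1, fun x y hy => ?_, hres.2.2⟩
      rw [hres.2.1 x y hy, vget_vset hshape him hj, if_neg (by tauto)]
    · rw [show whileSero g i j moveY (fuel+1) vs = vs from by
        rw [whileSero]; rw [if_neg (by tauto)]]
      refine ⟨hshape, fun _ _ _ => rfl, fun r hr => ?_⟩
      rw [hwin r hr]
      congr 1
      rw [markB_succ, hst, Bool.true_and]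
      congr 1
      by_cases hir : i ≤ r
      · by_cases hrm : r < i + moveY
        · have h1 : covB (colc g j) i r = true :=
            covB_restrict _ hcov hir (by omega)
          simp [h1, hir, hrm]
        · have h1 : covB (colc g j) i r = false := by
            cases h : covB (colc g j) i r
            · rfl
            · exfalso
              rw [covB_iff] at h
              rcases h with rfl | ⟨h, hall⟩
              · omega
              · exact hdot (hall (i+moveY) (by omega) (by omega))
          simp [h1, hir, hrm]
      · have h1 : covB (colc g j) i r = false := by
          cases h : covB (colc g j) i r
          · rfl
          · rw [covB_iff] at h
            rcases h with rfl | ⟨h, _⟩ <;> omega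
        simp [h1, hir]

def cntB (c : Nat → String) (n s : Nat) : Int :=
  (((List.range s).filter (fun j0 => startB c n j0)).length : Int)

lemma cntB_succ (c : Nat → String) (n s : Nat) :
    cntB c n (s+1) = cntB c n s + (if startB c n s then 1 else 0) := by
  rw [cntB, cntB, List.range_succ, List.filter_append]
  cases h : startB c n s <;> simp [h]

lemma startB_of_X (c : Nat → String) (n j : Nat) (h : c j = "X") :
    startB c n j = false := by
  simp [startB, h]

def InvG (g : List (List String)) (n i j : Nat) (vg : List (List Int)) : Prop :=
  shapeM vg n ∧
  (∀ k, k < n → vget vg i k = if markB (rowc g i) n j k then 1 else 0) ∧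
  (∀ i' k, i < i' → vget vg i' k = 0)

def InvS (g : List (List String)) (n i j : Nat) (vs : List (List Int)) : Prop :=
  shapeM vs n ∧
  (∀ cc, cc < n → ∀ r, r < n → vget vs r cc =
     if markB (colc g cc) n (i + if cc < j then 1 else 0) r then 1 else 0)

lemma startB_iff' (c : Nat → String) (n j : Nat) (hX : c j ≠ "X") (hjn : j + 1 < n) :
    startB c n j = true ↔ (c (j+1) = "." ∧ markB c n j j = false) := by
  constructor
  · intro h
    refine ⟨((startB_iff c n j).mp h).2.2.1, markB_of_ge c h le_rfl (by omega)⟩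
  · rintro ⟨hdot, hm⟩
    rw [startB_iff]
    refine ⟨hX, hjn, hdot, ?_⟩
    by_contra h4
    rw [not_or, not_or] at h4
    obtain ⟨h1, h2, h3⟩ := h4
    have : markB c n j j = true :=
      (markB_self_iff c (by omega)).mpr ⟨Nat.pos_of_ne_zero h1, not_not.mp h2, h3⟩
    rw [this] at hm
    exact absurd hm (by simp)

lemma if_markB_eq_zero {b : Bool} (h : (if b then (1:Int) else 0) = 0) : b = false := by
  cases b
  · rfl
  · simp at h

lemma guardG_iff (g : List (List String)) (N : Int) (i j : Nat)
    (hj : j < N.toNat) (hX : gcell g i j ≠ "X") (vg : List (List Int))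
    (hG : InvG g N.toNat i j vg) :
    (((j:Int)+1 < N ∧ vget vg i j = 0 ∧ vget vg i (j+1) = 0 ∧ gcell g i (j+1) = ".")
      ↔ startB (rowc g i) N.toNat j = true) := by
  by_cases hj1 : j + 1 < N.toNat
  · rw [startB_iff' (rowc g i) N.toNat j hX hj1]
    constructor
    · rintro ⟨_, hv0, _, hdot⟩
      rw [hG.2.1 j hj] at hv0
      exact ⟨hdot, if_markB_eq_zero hv0⟩
    · rintro ⟨hdot, hm⟩
      have hst : startB (rowc g i) N.toNat j = true :=
        (startB_iff' (rowc g i) N.toNat j hX hj1).mpr ⟨hdot, hm⟩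
      refine ⟨by omega, ?_, ?_, hdot⟩
      · rw [hG.2.1 j hj, hm]; rfl
      · rw [hG.2.1 (j+1) hj1, markB_of_ge _ hst (by omega) hj1]; rfl
  · constructor
    · rintro ⟨hlt, _⟩; exact absurd hlt (by omega)
    · intro h
      exact absurd ((startB_iff _ _ _).mp h).2.1 hj1

lemma guardS_iff (g : List (List String)) (N : Int) (i j : Nat)
    (hi : i < N.toNat) (hj : j < N.toNat) (hX : gcell g i j ≠ "X") (vs : List (List Int))
    (hS : InvS g N.toNat i j vs) :
    (((i:Int)+1 < N ∧ vget vs i j = 0 ∧ vget vs (i+1) j = 0 ∧ gcell g (i+1) j = ".")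
      ↔ startB (colc g j) N.toNat i = true) := by
  have hXc : colc g j i ≠ "X" := hX
  have hcl : ∀ r, r < N.toNat → vget vs r j =
      if markB (colc g j) N.toNat i r then 1 else 0 := by
    intro r hr
    have := hS.2 j hj r hr
    simpa using this
  by_cases hi1 : i + 1 < N.toNat
  · rw [startB_iff' (colc g j) N.toNat i hXc hi1]
    constructor
    · rintro ⟨_, hv0, _, hdot⟩
      rw [hcl i hi] at hv0
      exact ⟨hdot, if_markB_eq_zero hv0⟩
    · rintro ⟨hdot, hm⟩
      have hst : startB (colc g j) N.toNat i = true :=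
        (startB_iff' (colc g j) N.toNat i hXc hi1).mpr ⟨hdot, hm⟩
      refine ⟨by omega, ?_, ?_, hdot⟩
      · rw [hcl i hi, hm]; rfl
      · rw [hcl (i+1) hi1, markB_of_ge _ hst (by omega) hi1]; rfl
  · constructor
    · rintro ⟨hlt, _⟩; exact absurd hlt (by omega)
    · intro h
      exact absurd ((startB_iff _ _ _).mp h).2.1 hi1

lemma garo_true (g : List (List String)) (N : Int) (i j : Nat)
    (hi : i < N.toNat) (hj : j < N.toNat)
    (hst : startB (rowc g i) N.toNat j = true) (vg : List (List Int))
    (hG : InvG g N.toNat i j vg) :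
    InvG g N.toNat i (j+1)
      (whileGaro g i j 2 (N - (j:Int) - 2).toNat (vset (vset vg i j) i (j+1))) := by
  obtain ⟨hshape, hrow, hzero⟩ := hG
  obtain ⟨hXr, hj1, hdot, _⟩ := (startB_iff _ _ _).mp hst
  have hfuel : (N - (j:Int) - 2).toNat = N.toNat - (j + 2) := by omega
  have hsh2 : shapeM (vset (vset vg i j) i (j+1)) N.toNat :=
    shapeM_vset (shapeM_vset hshape)
  have hres := whileGaro_spec g N.toNat i j hi hst ((N - (j:Int) - 2).toNat) 2
    (vset (vset vg i j) i (j+1)) le_rfl hfuel hsh2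
    (by
      rw [show j + 2 - 1 = j + 1 from rfl, covB_iff]
      exact Or.inr ⟨by omega, fun t ht1 ht2 => by
        rw [show t = j + 1 from by omega]; exact hdot⟩)
    (by
      intro k hk
      rw [vget_vset (shapeM_vset hshape) hi hj1, vget_vset hshape hi hj]
      by_cases hk1 : k = j + 1
      · have hb : (markB (rowc g i) N.toNat j k ||
            (decide (j ≤ k) && decide (k < j + 2))) = true := by
          subst hk1; simp
        rw [if_pos ⟨rfl, hk1⟩, hb]; rfl
      · by_cases hk0 : k = j
        · have hb : (markB (rowc g i) N.toNat j k ||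
              (decide (j ≤ k) && decide (k < j + 2))) = true := by
            subst hk0; simp
          rw [if_neg (by tauto), if_pos ⟨rfl, hk0⟩, hb]; rfl
        · have hb : (decide (j ≤ k) && decide (k < j + 2)) = false := by
            have : ¬ (j ≤ k ∧ k < j + 2) := by omega
            simp only [Bool.and_eq_false_iff]
            by_cases h : j ≤ k
            · right; simp; omega
            · left; simp; omega
          rw [if_neg (by tauto), if_neg (by tauto), hrow k hk, hb, Bool.or_false])
  refine ⟨hres.1, hres.2.2, fun i' k hii => ?_⟩
  rw [hres.2.1 i' k (by omega), vget_vset (shapeM_vset hshape) hi hj1,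
    if_neg (by omega), vget_vset hshape hi hj, if_neg (by omega)]
  exact hzero i' k hii

lemma garo_false (g : List (List String)) (N : Int) (i j : Nat)
    (hst : startB (rowc g i) N.toNat j = false) (vg : List (List Int))
    (hG : InvG g N.toNat i j vg) : InvG g N.toNat i (j+1) vg := by
  obtain ⟨hshape, hrow, hzero⟩ := hG
  refine ⟨hshape, fun k hk => ?_, hzero⟩
  rw [hrow k hk, markB_succ, hst]
  simp

lemma sero_true (g : List (List String)) (N : Int) (i j : Nat)
    (hi : i < N.toNat) (hj : j < N.toNat)
    (hst : startB (colc g j) N.toNat i = true) (vs : List (List Int))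
    (hS : InvS g N.toNat i j vs) :
    InvS g N.toNat i (j+1)
      (whileSero g i j 2 (N - (i:Int) - 2).toNat (vset (vset vs i j) (i+1) j)) := by
  obtain ⟨hshape, hcl⟩ := hS
  obtain ⟨hXc, hi1, hdot, _⟩ := (startB_iff _ _ _).mp hst
  have hfuel : (N - (i:Int) - 2).toNat = N.toNat - (i + 2) := by omega
  have hsh2 : shapeM (vset (vset vs i j) (i+1) j) N.toNat :=
    shapeM_vset (shapeM_vset hshape)
  have hres := whileSero_spec g N.toNat i j hj hst ((N - (i:Int) - 2).toNat) 2
    (vset (vset vs i j) (i+1) j) le_rfl hfuel hsh2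
    (by
      rw [show i + 2 - 1 = i + 1 from rfl, covB_iff]
      exact Or.inr ⟨by omega, fun t ht1 ht2 => by
        rw [show t = i + 1 from by omega]; exact hdot⟩)
    (by
      intro r hr
      rw [vget_vset (shapeM_vset hshape) hi1 hj, vget_vset hshape hi hj]
      by_cases hr1 : r = i + 1
      · have hb : (markB (colc g j) N.toNat i r ||
            (decide (i ≤ r) && decide (r < i + 2))) = true := by
          subst hr1; simp
        rw [if_pos ⟨hr1, rfl⟩, hb]; rfl
      · by_cases hr0 : r = i
        · have hb : (markB (colc g j) N.toNat i r ||
              (decide (i ≤ r) && decide (r < i + 2))) = true := by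
            subst hr0; simp
          rw [if_neg (by tauto), if_pos ⟨hr0, rfl⟩, hb]; rfl
        · have hb : (decide (i ≤ r) && decide (r < i + 2)) = false := by
            simp only [Bool.and_eq_false_iff]
            by_cases h : i ≤ r
            · right; simp; omega
            · left; simp; omega
          have hcj := hcl j hj r hr
          simp only [lt_irrefl, if_false, Nat.add_zero] at hcj
          rw [if_neg (by tauto), if_neg (by tauto), hcj, hb, Bool.or_false])
  refine ⟨hres.1, fun cc hcc r hr => ?_⟩
  by_cases hccj : cc = j
  · subst hccj
    rw [hres.2.2 r hr]
    simp
  · rw [hres.2.1 r cc hccj, vget_vset (shapeM_vset hshape) hi1 hj,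
      if_neg (by tauto), vget_vset hshape hi hj, if_neg (by tauto), hcl cc hcc r hr]
    have : (if cc < j + 1 then 1 else 0) = (if cc < j then 1 else 0) := by
      by_cases h : cc < j
      · rw [if_pos h, if_pos (by omega)]
      · rw [if_neg h, if_neg (by omega)]
    rw [this]

lemma sero_false (g : List (List String)) (N : Int) (i j : Nat)
    (hj : j < N.toNat)
    (hst : startB (colc g j) N.toNat i = false) (vs : List (List Int))
    (hS : InvS g N.toNat i j vs) : InvS g N.toNat i (j+1) vs := by
  obtain ⟨hshape, hcl⟩ := hS
  refine ⟨hshape, fun cc hcc r hr => ?_⟩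
  rw [hcl cc hcc r hr]
  by_cases hccj : cc = j
  · subst hccj
    simp only [lt_irrefl, if_false, Nat.add_zero, Nat.lt_succ_iff, le_refl, if_true]
    rw [markB_succ, hst]
    simp
  · have : (if cc < j + 1 then 1 else 0) = (if cc < j then 1 else 0) := by
      by_cases h : cc < j
      · rw [if_pos h, if_pos (by omega)]
      · rw [if_neg h, if_neg (by omega)]
    rw [this]

def ngE (g : List (List String)) (n i j : Nat) : Int :=
  ((List.range i).map (fun i' => cntB (rowc g i') n n)).sum + cntB (rowc g i) n j

def nsE (g : List (List String)) (n i j : Nat) : Int :=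
  ((List.range n).map (fun cc => cntB (colc g cc) n (i + if cc < j then 1 else 0))).sum

def InvAll (g : List (List String)) (N : Int) (i j : Nat)
    (st : List (List Int) × List (List Int) × Int × Int) : Prop :=
  InvG g N.toNat i j st.1 ∧ InvS g N.toNat i j st.2.1 ∧
  st.2.2.1 = ngE g N.toNat i j ∧ st.2.2.2 = nsE g N.toNat i j

lemma sum_map_range_ite (n j : Nat) (d : Int) (hj : j < n) :
    ((List.range n).map (fun cc => if cc = j then d else 0)).sum = d := by
  induction n with
  | zero => omega
  | succ m ih =>
    rw [List.range_succ, List.map_append, List.sum_append]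
    by_cases h : j < m
    · rw [ih h]
      have hne : ¬ (m = j) := by omega
      simp [hne]
    · have hmj : m = j := by omega
      subst hmj
      have hz : ((List.range m).map (fun cc => if cc = m then d else (0:Int))).sum = 0 := by
        apply List.sum_eq_zero
        intro x hx
        simp only [List.mem_map, List.mem_range] at hx
        obtain ⟨cc, hcc, rfl⟩ := hx
        rw [if_neg (by omega)]
      rw [hz]
      simp

lemma nsE_succ (g : List (List String)) (n i j : Nat) (hj : j < n) :
    nsE g n i (j+1) = nsE g n i j + (if startB (colc g j) n i then 1 else 0) := by
  rw [nsE, nsE]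
  have hpt : ∀ cc, cntB (colc g cc) n (i + if cc < j + 1 then 1 else 0)
      = cntB (colc g cc) n (i + if cc < j then 1 else 0)
        + (if cc = j then (if startB (colc g j) n i then 1 else 0) else 0) := by
    intro cc
    by_cases hcc : cc = j
    · subst hcc
      simp only [lt_irrefl, if_false, Nat.add_zero, Nat.lt_succ_iff, le_refl, if_true, if_pos rfl]
      exact cntB_succ _ _ _
    · have heq : (i + if cc < j + 1 then 1 else 0) = (i + if cc < j then 1 else 0) := by
        by_cases h : cc < j
        · rw [if_pos h, if_pos (by omega)]
        · rw [if_neg h, if_neg (by omega)]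
      rw [heq, if_neg hcc, add_zero]
  calc ((List.range n).map (fun cc => cntB (colc g cc) n (i + if cc < j + 1 then 1 else 0))).sum
      = ((List.range n).map (fun cc =>
          cntB (colc g cc) n (i + if cc < j then 1 else 0)
          + (if cc = j then (if startB (colc g j) n i then 1 else 0) else 0))).sum := by
        congr 1
        exact List.map_congr_left (fun cc _ => hpt cc)
    _ = _ := by
        rw [PySem.List.sum_map_add_int, sum_map_range_ite n j _ hj]

lemma bodyA_step (g : List (List String)) (N : Int) (i j : Nat)
    (hi : i < N.toNat) (hj : j < N.toNat)
    (st : List (List Int) × List (List Int) × Int × Int)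
    (h : InvAll g N i j st) : InvAll g N i (j+1) (bodyA g N i j st) := by
  obtain ⟨vg, vs, ng, ns⟩ := st
  obtain ⟨hG, hS, hng, hns⟩ := h
  dsimp only at hG hS hng hns
  have hngE : ngE g N.toNat i (j+1)
      = ngE g N.toNat i j + (if startB (rowc g i) N.toNat j then 1 else 0) := by
    rw [ngE, ngE, cntB_succ, add_assoc]
  have hnsE := nsE_succ g N.toNat i j hj
  by_cases hX : gcell g i j = "X"
  · have hsr : startB (rowc g i) N.toNat j = false := startB_of_X _ _ _ hX
    have hsc : startB (colc g j) N.toNat i = false := startB_of_X _ _ _ hX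
    rw [bodyA, if_pos hX]
    refine ⟨garo_false _ _ _ _ hsr _ hG, sero_false _ _ _ _ hj hsc _ hS, ?_, ?_⟩
    · rw [hngE, hsr]; simpa using hng
    · rw [hnsE, hsc]; simpa using hns
  · have hGiff := guardG_iff g N i j hj hX vg hG
    have hSiff := guardS_iff g N i j hi hj hX vs hS
    rw [bodyA, if_neg hX]
    dsimp only
    by_cases hGg : ((j:Int)+1 < N ∧ vget vg i j = 0 ∧ vget vg i (j+1) = 0 ∧ gcell g i (j+1) = ".")
    <;> by_cases hGs : ((i:Int)+1 < N ∧ vget vs i j = 0 ∧ vget vs (i+1) j = 0 ∧ gcell g (i+1) j = ".")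
    · rw [if_pos hGg, if_pos hGs]
      have hsr := hGiff.mp hGg
      have hsc := hSiff.mp hGs
      exact ⟨garo_true g N i j hi hj hsr vg hG, sero_true g N i j hi hj hsc vs hS,
        by dsimp only; rw [hng, hngE, hsr]; simp, by dsimp only; rw [hns, hnsE, hsc]; simp⟩
    · rw [if_pos hGg, if_neg hGs]
      have hsr := hGiff.mp hGg
      have hsc : startB (colc g j) N.toNat i = false := by
        cases h : startB (colc g j) N.toNat i
        · rfl
        · exact absurd (hSiff.mpr h) hGs
      exact ⟨garo_true g N i j hi hj hsr vg hG, sero_false _ _ _ _ hj hsc _ hS,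
        by dsimp only; rw [hng, hngE, hsr]; simp, by dsimp only; rw [hns, hnsE, hsc]; simp⟩
    · rw [if_neg hGg, if_pos hGs]
      have hsr : startB (rowc g i) N.toNat j = false := by
        cases h : startB (rowc g i) N.toNat j
        · rfl
        · exact absurd (hGiff.mpr h) hGg
      have hsc := hSiff.mp hGs
      exact ⟨garo_false _ _ _ _ hsr _ hG, sero_true g N i j hi hj hsc vs hS,
        by dsimp only; rw [hng, hngE, hsr]; simp, by dsimp only; rw [hns, hnsE, hsc]; simp⟩
    · rw [if_neg hGg, if_neg hGs]
      have hsr : startB (rowc g i) N.toNat j = false := by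
        cases h : startB (rowc g i) N.toNat j
        · rfl
        · exact absurd (hGiff.mpr h) hGg
      have hsc : startB (colc g j) N.toNat i = false := by
        cases h : startB (colc g j) N.toNat i
        · rfl
        · exact absurd (hSiff.mpr h) hGs
      exact ⟨garo_false _ _ _ _ hsr _ hG, sero_false _ _ _ _ hj hsc _ hS,
        by dsimp only; rw [hng, hngE, hsr]; simp, by dsimp only; rw [hns, hnsE, hsc]; simp⟩

lemma markB_zero (c : Nat → String) (n k : Nat) : markB c n 0 k = false := by
  simp [markB]

lemma row_fold (g : List (List String)) (N : Int) (i : Nat) (hi : i < N.toNat)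
    (st0 : List (List Int) × List (List Int) × Int × Int)
    (h0 : InvAll g N i 0 st0) :
    ∀ j, j ≤ N.toNat →
      InvAll g N i j ((List.range j).foldl (fun st' j' => bodyA g N i j' st') st0) := by
  intro j
  induction j with
  | zero => intro _; simpa using h0
  | succ m ih =>
    intro hm
    rw [List.range_succ, List.foldl_append]
    exact bodyA_step g N i m hi (by omega) _ (ih (by omega))

lemma row_shift (g : List (List String)) (N : Int) (i : Nat)
    (st : List (List Int) × List (List Int) × Int × Int)
    (h : InvAll g N i N.toNat st) : InvAll g N (i+1) 0 st := by
  obtain ⟨⟨hsh, hrow, hzero⟩, ⟨hshS, hcl⟩, hng, hns⟩ := h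
  refine ⟨⟨hsh, fun k hk => ?_, fun i' k hii => hzero i' k (by omega)⟩,
    ⟨hshS, fun cc hcc r hr => ?_⟩, ?_, ?_⟩
  · rw [hzero (i+1) k (by omega), markB_zero]
    simp
  · rw [hcl cc hcc r hr, if_pos hcc]
    have : ¬ cc < 0 := by omega
    rw [if_neg this, add_zero]
  · have h0 : cntB (rowc g (i+1)) N.toNat 0 = 0 := by rw [cntB]; simp
    rw [hng, ngE, ngE, h0, List.range_succ, List.map_append, List.sum_append, add_zero]
    simp
  · rw [hns, nsE, nsE]
    congr 1
    apply List.map_congr_left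
    intro cc hcc
    rw [List.mem_range] at hcc
    rw [if_pos hcc]
    have : ¬ cc < 0 := by omega
    rw [if_neg this, add_zero]

lemma init_inv (g : List (List String)) (N : Int) :
    InvAll g N 0 0
      (List.replicate N.toNat (List.replicate N.toNat (0:Int)),
       List.replicate N.toNat (List.replicate N.toNat (0:Int)), 0, 0) := by
  refine ⟨⟨shapeM_replicate _, fun k hk => ?_, fun i' k _ => vget_replicate _ _ _⟩,
    ⟨shapeM_replicate _, fun cc hcc r hr => ?_⟩, ?_, ?_⟩
  · rw [vget_replicate, markB_zero]
    simp
  · rw [vget_replicate]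
    have : ¬ cc < 0 := by omega
    rw [if_neg this, add_zero, markB_zero]
    simp
  · rw [ngE, cntB]
    simp
  · rw [nsE]
    dsimp only
    rw [List.sum_eq_zero]
    intro x hx
    simp only [List.mem_map, List.mem_range] at hx
    obtain ⟨cc, hcc, rfl⟩ := hx
    have : ¬ cc < 0 := by omega
    rw [if_neg this, add_zero, cntB]
    simp

lemma outer_fold (g : List (List String)) (N : Int) :
    ∀ i, i ≤ N.toNat →
      InvAll g N i 0
        ((List.range i).foldl
          (fun st i' => (List.range N.toNat).foldl (fun st' j => bodyA g N i' j st') st)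
          (List.replicate N.toNat (List.replicate N.toNat (0:Int)),
           List.replicate N.toNat (List.replicate N.toNat (0:Int)), 0, 0)) := by
  intro i
  induction i with
  | zero => intro _; simpa using init_inv g N
  | succ m ih =>
    intro hm
    rw [List.range_succ, List.foldl_append]
    exact row_shift g N m _ (row_fold g N m (by omega) _ (ih (by omega)) N.toNat le_rfl)

lemma runsB_eq (line : List String) (N : Int) (c : Nat → String)
    (hc : ∀ k, k < N.toNat → line.getD k "" = c k) :
    runsB line N = cntB c N.toNat N.toNat := by
  have hn1 : (N - 1).toNat = N.toNat - 1 := by omega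
  rw [runsB, hn1]
  have hfc := PySem.List.foldl_count_if
      (fun j => decide (line.getD j "" ≠ "X" ∧ line.getD (j+1) "" = "." ∧
        (j = 0 ∨ line.getD j "" ≠ "." ∨ line.getD (j-1) "" = "X")))
      (List.range (N.toNat - 1)) 0
  simp only [decide_eq_true_eq] at hfc
  rw [hfc, zero_add, cntB]
  congr 1
  rw [List.countP_eq_length_filter]
  have hsplit : (List.range N.toNat).filter (fun j0 => startB c N.toNat j0)
      = (List.range (N.toNat - 1)).filter (fun j0 => startB c N.toNat j0) := by
    rcases Nat.eq_zero_or_pos N.toNat with h0 | h0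
    · rw [h0]
    · have hrange : List.range N.toNat = List.range (N.toNat - 1) ++ [N.toNat - 1] := by
        conv_lhs => rw [show N.toNat = (N.toNat - 1) + 1 from by omega]
        rw [List.range_succ]
      rw [hrange, List.filter_append]
      have hlast : startB c N.toNat (N.toNat - 1) = false := by
        rw [startB]
        have h2 : ¬ (N.toNat - 1 + 1 < N.toNat) := by omega
        simp [h2]
      simp [hlast]
  rw [hsplit]
  congr 1
  apply List.filter_congr
  intro j hj
  rw [List.mem_range] at hj
  have e0 : line.getD j "" = c j := hc j (by omega)
  have e1 : line.getD (j+1) "" = c (j+1) := hc (j+1) (by omega)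
  have e2 : line.getD (j-1) "" = c (j-1) := hc (j-1) (by omega)
  simp only [e0, e1, e2]
  have hj1 : j + 1 < N.toNat := by omega
  cases h : startB c N.toNat j
  · rw [decide_eq_false_iff_not]
    intro hP
    rw [(startB_iff c N.toNat j).mpr ⟨hP.1, hj1, hP.2.1, hP.2.2⟩] at h
    exact absurd h (by simp)
  · rw [startB_iff] at h
    exact decide_eq_true ⟨h.1, h.2.2.1, h.2.2.2⟩

theorem check_eq_alt (graph : List (List String)) (N : Int) :
    check graph N = check_alt graph N := by
  obtain ⟨_, _, hng, hns⟩ := outer_fold graph N N.toNat le_rfl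
  have hA : ngE graph N.toNat N.toNat 0
      = ((List.range N.toNat).map (fun i => runsB (graph.getD i []) N)).sum := by
    rw [ngE, cntB]
    simp only [List.range_zero, List.filter_nil, List.length_nil, Nat.cast_zero, add_zero]
    congr 1
    apply List.map_congr_left
    intro i _
    exact (runsB_eq (graph.getD i []) N (rowc graph i) (fun k hk => rfl)).symm
  have hB : nsE graph N.toNat N.toNat 0
      = ((List.range N.toNat).map
          (fun j => runsB ((List.range N.toNat).map
            (fun i => (graph.getD i []).getD j "")) N)).sum := by
    rw [nsE]
    congr 1
    apply List.map_congr_left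
    intro cc _
    have h0 : ¬ cc < 0 := by omega
    rw [if_neg h0, add_zero]
    exact (runsB_eq _ N (colc graph cc)
      (fun k hk => PySem.List.getD_map_range _ _ _ _ hk)).symm
  rw [check, check_alt]
  rw [hng, hns, hA, hB]

-- ===== VERDICT (by name: the statement is the Claim_ definition above) =====
theorem check_spec : Claim_equal_check := by
  intro graph N _ _
  exact check_eq_alt graph N
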